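-- pv_equiv track=rewrite | github.com/HyunSung-Na/TIL-algorism | 알고리즘/예산.py | solution
-- ===== SOURCE A (Python) =====
-- def mid_value(budgets, mid):
--     stack_min = []
--     stack_max = []
--     for budget in budgets:
--         if budget <= mid:
--             stack_min.append(budget)
--         else:
--             stack_max.append(budget)
--     min = sum(stack_min)
--     max = sum(stack_max)
--     return [min,max,len(stack_max)]
--
-- def solution(budgets, M):
--     budgets.sort()
--     for budget in budgets:
--         if budget * len(budgets) <= M:
--             mid_budget = budget
--     if sum(budgets) <= M:
--         return max(budgets)
--     sumlist = mid_value(budgets, mid_budget)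
--     remainder = M - sumlist[0]
--     notEnough = remainder - (sumlist[2] * mid_budget)
--     answer = (notEnough // sumlist[2]) + mid_budget
--     return answer
-- ===== SOURCE B (Python) =====
-- def solution(budgets, M):
--     # One pass, no sort, no pivot budget: the group A caps is exactly
--     # {b : b*n <= M}, and A's arithmetic collapses to (M - sum(group)) // (#rest).
--     n = len(budgets)
--     total = small = k = 0
--     for b in budgets:
--         total += b
--         if b * n <= M:
--             small += b
--         else:
--             k += 1
--     if total <= M:
--         return max(budgets)
--     return (M - small) // k
-- ===== Notes on version B (the rewrite author's own statement) =====
-- stated objective: faster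
-- what changed: B removes the sort, the pivot-budget search and the partition entirely: one fused pass accumulates total, the sum of budgets with b*n<=M and the count of the rest, and returns (M-small)//k directly, using the identity that A's answer mid+(M-small-k*mid)//k collapses to (M-small)//k with the capped group characterised as {b : b*n<=M}.
import Mathlib
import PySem

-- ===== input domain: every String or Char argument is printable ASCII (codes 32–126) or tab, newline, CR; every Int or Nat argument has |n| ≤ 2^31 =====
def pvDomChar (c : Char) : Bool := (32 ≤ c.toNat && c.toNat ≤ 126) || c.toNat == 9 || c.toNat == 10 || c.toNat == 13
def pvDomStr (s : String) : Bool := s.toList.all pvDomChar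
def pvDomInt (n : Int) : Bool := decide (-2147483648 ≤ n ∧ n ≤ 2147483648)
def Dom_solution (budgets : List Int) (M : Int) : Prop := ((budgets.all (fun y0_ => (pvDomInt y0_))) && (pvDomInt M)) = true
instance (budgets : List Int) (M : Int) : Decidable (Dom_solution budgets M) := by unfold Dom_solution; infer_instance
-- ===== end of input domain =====

-- B drops A's sort, pivot search and partition for ONE fused pass and a direct floor division
-- (measured faster, A is O(n log n), B is O(n)); equivalence is about the RETURN value only:
-- A sorts its argument in place, B does not mutate it.

-- ===== PORT A =====
def mid_value (budgets : List Int) (mid : Int) : List Int :=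
  let p := budgets.foldl
    (fun (s : List Int × List Int) budget =>
      (if budget ≤ mid then s.1 ++ [budget] else s.1,
       if budget ≤ mid then s.2 else s.2 ++ [budget]))
    ([], [])
  [p.1.sum, p.2.sum, (p.2.length : Int)]

def solution (budgets : List Int) (M : Int) : Int :=
  let bs := PySem.List.sorted budgets (fun x => x) false
  let midB : Option Int := bs.foldl
    (fun acc budget => if budget * (bs.length : Int) ≤ M then some budget else acc) none
  if bs.sum ≤ M then
    match PySem.List.max? bs (fun x => x) with
    | some m => m
    | none => 0          -- Python: max([]) raises ValueError; excluded by Pre_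
  else
    match midB with
    | none => 0          -- Python: NameError (mid_budget unbound); excluded by Pre_
    | some mid_budget =>
      let sumlist := mid_value bs mid_budget
      let remainder := M - PySem.List.pyGetD sumlist 0 0
      let notEnough := remainder - (PySem.List.pyGetD sumlist 2 0) * mid_budget
      PySem.Int.floordiv notEnough (PySem.List.pyGetD sumlist 2 0) + mid_budget

-- ===== PORT B =====
def solution_alt (budgets : List Int) (M : Int) : Int :=
  let n := (budgets.length : Int)
  let st := budgets.foldl
    (fun (s : Int × Int × Int) b =>
      (s.1 + b,
       if b * n ≤ M then s.2.1 + b else s.2.1,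
       if b * n ≤ M then s.2.2 else s.2.2 + 1))
    (0, 0, 0)
  if st.1 ≤ M then
    match PySem.List.max? budgets (fun x => x) with
    | some m => m
    | none => 0          -- Python: max([]) raises ValueError; excluded by Pre_
  else
    PySem.Int.floordiv (M - st.2.1) st.2.2

-- ===== PRECONDITION & SPEC =====
-- Pre_ excludes exactly the inputs where the Python A raises: the empty list
-- (ValueError from max) and nonempty lists with total > M where no budget satisfies
-- budget*n <= M (NameError: mid_budget never assigned).
def Pre_solution (budgets : List Int) (M : Int) : Prop :=
  budgets ≠ [] ∧ (¬ budgets.sum ≤ M → ∃ b ∈ budgets, b * (budgets.length : Int) ≤ M)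
instance (budgets : List Int) (M : Int) : Decidable (Pre_solution budgets M) := by
  unfold Pre_solution; infer_instance

def pvWitness_solution : List Int × Int := ([1, 3, 2, 5], 9)

def Spec_solution (budgets : List Int) (M : Int) (out : Int) : Prop := out = solution_alt budgets M
instance (budgets : List Int) (M : Int) (out : Int) : Decidable (Spec_solution budgets M out) := by
  unfold Spec_solution; infer_instance

-- ===== CLAIM (what is proved, stated in full; the proofs are below) =====
def Claim_equal_solution : Prop := ∀ (budgets : List Int) (M : Int), Dom_solution budgets M → Pre_solution budgets M → Spec_solution budgets M (solution budgets M)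

-- ===== LEMMAS AND PROOFS =====

-- The 'keep the last satisfying element' loop, characterised by filter + getLast?.
theorem foldl_pick_eq (p : Int → Prop) [DecidablePred p] (l : List Int) (a : Option Int) :
    l.foldl (fun acc b => if p b then some b else acc) a
      = Option.or (l.filter (fun b => decide (p b))).getLast? a := by
  induction l generalizing a with
  | nil => simp
  | cons x t ih =>
    simp only [List.foldl_cons, ih, List.filter_cons]
    by_cases hx : p x
    · simp only [hx, decide_true, if_pos]
      cases htf : t.filter (fun b => decide (p b)) with
      | nil => simp
      | cons y ys =>
        rw [List.getLast?_cons_cons]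
        cases hgl : (y :: ys).getLast? with
        | none => simp [List.getLast?_eq_none_iff] at hgl
        | some z => simp [Option.or]
    · simp [hx]

-- In a ≤-sorted list every element is ≤ the last one.
theorem le_getLast_of_pairwise (l : List Int) (hp : l.Pairwise (· ≤ ·)) :
    ∀ y ∈ l, ∀ z, l.getLast? = some z → y ≤ z := by
  induction l with
  | nil => intro y hy; simp at hy
  | cons x t ih =>
    intro y hy z hz
    cases t with
    | nil =>
      simp at hy hz; omega
    | cons w ws =>
      rw [List.getLast?_cons_cons] at hz
      rcases List.mem_cons.mp hy with rfl | hyt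
      · have hxz : z ∈ w :: ws := List.mem_of_getLast? hz
        exact (List.pairwise_cons.mp hp).1 z hxz
      · exact ih (List.pairwise_cons.mp hp).2 y hyt z hz

-- Two maxima of permuted lists agree.
theorem max_unique {l l' : List Int} (hperm : l.Perm l') {a b : Int}
    (ha : a ∈ l) (hamax : ∀ y ∈ l, y ≤ a) (hb : b ∈ l') (hbmax : ∀ y ∈ l', y ≤ b) :
    a = b :=
  le_antisymm (hbmax a (hperm.mem_iff.mp ha)) (hamax b (hperm.mem_iff.mpr hb))

-- max? (with the identity key) of permuted lists gives the same value.
theorem max?_id_eq_of_perm {l l' : List Int} (hperm : l.Perm l') :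
    PySem.List.max? l (fun x => x) = PySem.List.max? l' (fun x => x) := by
  cases hl : PySem.List.max? l (fun x => x) with
  | none =>
    have h0 : l = [] := (PySem.List.max?_eq_none_iff _ _).mp hl
    subst h0
    rw [List.perm_nil.mp hperm.symm]
    exact ((PySem.List.max?_eq_none_iff _ _).mpr rfl).symm
  | some a =>
    cases hl' : PySem.List.max? l' (fun x => x) with
    | none =>
      have h0 : l' = [] := (PySem.List.max?_eq_none_iff _ _).mp hl'
      subst h0
      rw [List.perm_nil.mp hperm, (PySem.List.max?_eq_none_iff _ _).mpr rfl] at hl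
      exact hl.symm
    | some b =>
      have := max_unique hperm (PySem.List.max?_mem hl) (PySem.List.max?_isMax hl)
        (PySem.List.max?_mem hl') (PySem.List.max?_isMax hl')
      simp [this]

-- The last element of the ≤-sorted filtered list is max? of the unsorted filtered list.
theorem getLast?_sorted_filter_eq_max? (budgets : List Int) (p : Int → Bool) :
    ((PySem.List.sorted budgets (fun x => x) false).filter p).getLast?
      = PySem.List.max? (budgets.filter p) (fun x => x) := by
  set s := PySem.List.sorted budgets (fun x => x) false with hs
  have hperm : (s.filter p).Perm (budgets.filter p) :=
    (PySem.List.sorted_perm budgets (fun x => x) false).filter p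
  have hpw : (s.filter p).Pairwise (· ≤ ·) :=
    (PySem.List.sorted_pairwise budgets (fun x => x)).filter _
  cases hfl : (s.filter p).getLast? with
  | none =>
    have : s.filter p = [] := by
      cases h : s.filter p with
      | nil => rfl
      | cons y ys => rw [h] at hfl; simp [List.getLast?_cons] at hfl
    rw [this] at hperm
    rw [List.perm_nil.mp hperm.symm, (PySem.List.max?_eq_none_iff _ _).mpr rfl]
  | some z =>
    have hzmem : z ∈ s.filter p := List.mem_of_getLast? hfl
    have hzmax : ∀ y ∈ s.filter p, y ≤ z := fun y hy =>
      le_getLast_of_pairwise _ hpw y hy z hfl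
    cases hm : PySem.List.max? (budgets.filter p) (fun x => x) with
    | none =>
      have h0 := (PySem.List.max?_eq_none_iff _ _).mp hm
      rw [h0] at hperm
      rw [List.perm_nil.mp hperm] at hzmem
      simp at hzmem
    | some b =>
      have := max_unique hperm hzmem hzmax (PySem.List.max?_mem hm) (PySem.List.max?_isMax hm)
      simp [this]

-- The split loop of mid_value, characterised by the two filters.
theorem mid_value_eq (l : List Int) (mid : Int) :
    mid_value l mid = [(l.filter (fun b => decide (b ≤ mid))).sum,
      (l.filter (fun b => decide (mid < b))).sum,
      ((l.filter (fun b => decide (mid < b))).length : Int)] := by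
  simp only [mid_value]
  have hg : ∀ (acc : List Int) (b : Int),
      (if b ≤ mid then acc else acc ++ [b]) = (if mid < b then acc ++ [b] else acc) := by
    intro acc b
    by_cases h : b ≤ mid
    · simp [h, not_lt.mpr h]
    · simp [h, lt_of_not_ge h]
  rw [PySem.List.foldl_prod_mk
    (f := fun acc b => if b ≤ mid then acc ++ [b] else acc)
    (g := fun acc b => if b ≤ mid then acc else acc ++ [b])]
  have hG : List.foldl (fun acc b => if b ≤ mid then acc else acc ++ [b]) ([] : List Int) l
      = List.foldl (fun acc b => if mid < b then acc ++ [b] else acc) [] l :=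
    PySem.List.foldl_congr_mem _ _ _ _ (fun acc b _ => hg acc b)
  rw [hG, PySem.List.foldl_append_ite_eq_filter, PySem.List.foldl_append_ite_eq_filter]
  simp

-- B's single fused loop, characterised by sum / filter-sum / countP.
theorem b_fold_eq (l : List Int) (n M : Int) (a b c : Int) :
    l.foldl (fun (s : Int × Int × Int) x =>
        (s.1 + x,
         if x * n ≤ M then s.2.1 + x else s.2.1,
         if x * n ≤ M then s.2.2 else s.2.2 + 1))
      (a, b, c)
      = (a + l.sum,
         b + (l.filter (fun x => decide (x * n ≤ M))).sum,
         c + (l.countP (fun x => decide (¬ x * n ≤ M)) : Int)) := by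
  induction l generalizing a b c with
  | nil => simp
  | cons x t ih =>
    simp only [List.foldl_cons, ih, List.filter_cons, List.countP_cons]
    by_cases h : x * n ≤ M <;>
      refine Prod.ext ?_ (Prod.ext ?_ ?_) <;> simp [h] <;> (try push_cast) <;> ring

-- If every element satisfies b*c ≤ M then the sum is bounded by length*M.
theorem sum_mul_le (l : List Int) (c M : Int) (h : ∀ b ∈ l, b * c ≤ M) :
    l.sum * c ≤ (l.length : Int) * M := by
  induction l with
  | nil => simp
  | cons x t ih =>
    have hx := h x (List.mem_cons_self)
    have ht := ih (fun b hb => h b (List.mem_cons_of_mem _ hb))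
    simp only [List.sum_cons, List.length_cons]
    push_cast
    nlinarith

-- ===== VERDICT (by name: the statements are the Claim_ definitions above) =====
theorem solution_spec : Claim_equal_solution := by
  intro budgets M _ hpre
  obtain ⟨hne, hex⟩ := hpre
  unfold Spec_solution solution solution_alt
  set nI : Int := (budgets.length : Int) with hnI
  set s := PySem.List.sorted budgets (fun x => x) false with hs
  have hperm : s.Perm budgets := PySem.List.sorted_perm budgets (fun x => x) false
  have hlen : s.length = budgets.length := hperm.length_eq
  have hsum : s.sum = budgets.sum := hperm.sum_eq
  simp only [hlen, hsum]
  rw [b_fold_eq]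
  simp only [zero_add]
  by_cases hM : budgets.sum ≤ M
  · simp only [if_pos hM, max?_id_eq_of_perm hperm]
  · simp only [if_neg hM]
    rw [foldl_pick_eq (fun b => b * nI ≤ M), getLast?_sorted_filter_eq_max?]
    obtain ⟨b0, hb0mem, hb0le⟩ := hex hM
    have hb0f : b0 ∈ budgets.filter (fun b => decide (b * nI ≤ M)) := by
      simp [List.mem_filter, hb0mem, hb0le]
    cases hm : PySem.List.max? (budgets.filter (fun b => decide (b * nI ≤ M))) (fun x => x) with
    | none =>
      rw [(PySem.List.max?_eq_none_iff _ _).mp hm] at hb0f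
      simp at hb0f
    | some mid =>
      simp only [Option.or]
      rw [mid_value_eq]
      -- mid is in the filtered list: mid * nI ≤ M and mid ∈ budgets
      have hmidf := PySem.List.max?_mem hm
      have hmidle : mid * nI ≤ M := by
        have := (List.mem_filter.mp hmidf).2; simpa using this
      have hmax := PySem.List.max?_isMax hm
      -- key: for members, (b ≤ mid) ↔ (b * nI ≤ M)
      have hn0 : 0 < nI := by
        rw [hnI]
        exact_mod_cast List.length_pos_iff.mpr hne
      have hiff : ∀ b ∈ budgets, (b ≤ mid ↔ b * nI ≤ M) := by
        intro b hb
        constructor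
        · intro hle
          calc b * nI ≤ mid * nI := by nlinarith
            _ ≤ M := hmidle
        · intro hle
          exact hmax b (by simp [List.mem_filter, hb, hle])
      have hiffs : ∀ b ∈ s, (b ≤ mid ↔ b * nI ≤ M) := fun b hb => hiff b (hperm.mem_iff.mp hb)
      -- rewrite A's filters over s into B's filters over budgets
      have hf1 : s.filter (fun b => decide (b ≤ mid))
          = s.filter (fun b => decide (b * nI ≤ M)) := by
        apply List.filter_congr
        intro b hb; simpa using (hiffs b hb)
      have hf2 : s.filter (fun b => decide (mid < b))
          = s.filter (fun b => decide (¬ b * nI ≤ M)) := by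
        apply List.filter_congr
        intro b hb
        have := hiffs b hb
        by_cases h : b * nI ≤ M <;> simp [h] <;> omega
      have hsum1 : (s.filter (fun b => decide (b ≤ mid))).sum
          = (budgets.filter (fun b => decide (b * nI ≤ M))).sum := by
        rw [hf1]; exact (hperm.filter _).sum_eq
      have hcnt : ((s.filter (fun b => decide (mid < b))).length : Int)
          = (budgets.countP (fun b => decide (¬ b * nI ≤ M)) : Int) := by
        rw [hf2, (hperm.filter _).length_eq, ← List.countP_eq_length_filter]
      -- k ≠ 0 : some element violates b * nI ≤ M, else the total would be ≤ M
      have hkpos : 0 < budgets.countP (fun b => decide (¬ b * nI ≤ M)) := by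
        rw [List.countP_pos_iff]
        by_contra hall
        push Not at hall
        have hall' : ∀ b ∈ budgets, b * nI ≤ M := by
          intro b hb
          have := hall b hb; simpa using this
        have := sum_mul_le budgets nI M hall'
        rw [← hnI] at this
        have : budgets.sum ≤ M := by nlinarith
        exact hM this
      have hkne : (budgets.countP (fun b => decide (¬ b * nI ≤ M)) : Int) ≠ 0 := by
        have h0 : (0 : Int) < (budgets.countP (fun b => decide (¬ b * nI ≤ M)) : Int) := by
          exact_mod_cast hkpos
        omega
      -- the arithmetic collapse: (M - small - k*mid) fdiv k + mid = (M - small) fdiv k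
      simp only [PySem.List.pyGetD, hsum1, hcnt]
      set small := (budgets.filter (fun b => decide (b * nI ≤ M))).sum
      set k : Int := (budgets.countP (fun b => decide (¬ b * nI ≤ M)) : Int)
      show PySem.Int.floordiv (M - small - k * mid) k + mid = PySem.Int.floordiv (M - small) k
      have : M - small - k * mid = (M - small) + (-mid) * k := by ring
      rw [this]
      show ((M - small) + (-mid) * k).fdiv k + mid = (M - small).fdiv k
      rw [Int.add_mul_fdiv_right _ _ hkne]
      ring
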